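-- pv_equiv track=rewrite | github.com/kxbk100/NK_quant | src_product/f1_functions.py | parallel_filter_handle
-- ===== SOURCE A (Python) =====
-- def parallel_filter_handle(filter_before_exec):
--     '''
--     将默认的串联过滤转化为并联过滤,只使用于filter_generate生成的过滤逻辑,后置过滤不适用,默认并联
--     '''
--     series_filter_list = []
--     for content in filter_before_exec:
--         series_filter_list += content.split('\n')
--     define_strs_list = [x for x in series_filter_list if 'loc' not in x]
--     filter_strs_list = [x for x in series_filter_list if 'loc' in x]
--     parallel_filter_list = define_strs_list + filter_strs_list
--     return parallel_filter_list, 'between'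
-- ===== SOURCE B (Python) =====
-- def parallel_filter_handle(filter_before_exec):
--     series_filter_list = [part for content in filter_before_exec
--                           for part in content.split('\n')]
--     return sorted(series_filter_list, key=lambda x: 'loc' in x), 'between'
-- ===== Notes on version B (the rewrite author's own statement) =====
-- stated objective: idiomatic
-- what changed: Replaces the two filtering comprehensions plus concatenation with a single stable sort on the boolean key ('loc' in x), which partitions the flattened list while preserving intra-group order.
import Mathlib
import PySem

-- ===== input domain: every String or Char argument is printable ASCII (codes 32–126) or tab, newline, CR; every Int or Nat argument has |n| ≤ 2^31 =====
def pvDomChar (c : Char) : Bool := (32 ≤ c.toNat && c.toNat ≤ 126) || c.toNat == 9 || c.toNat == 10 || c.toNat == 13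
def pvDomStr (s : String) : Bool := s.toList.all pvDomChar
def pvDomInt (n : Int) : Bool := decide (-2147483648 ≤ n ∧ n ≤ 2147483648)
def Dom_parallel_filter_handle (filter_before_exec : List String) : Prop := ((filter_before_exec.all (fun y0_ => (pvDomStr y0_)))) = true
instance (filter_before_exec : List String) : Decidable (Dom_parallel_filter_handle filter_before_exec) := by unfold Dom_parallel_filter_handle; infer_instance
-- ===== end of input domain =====

-- B replaces A's two filtering passes + concatenation by one stable sort on the
-- boolean key ('loc' in x); structurally different, not faster (objective: idiomatic).

-- ===== PORT A =====
-- content.split('\n'): sep is nonempty so PySem.Str.split? is always `some`; getD [] is never hit.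
def parallel_filter_handle (filter_before_exec : List String) : List String × String :=
  let series_filter_list :=
    filter_before_exec.foldl (fun acc content => acc ++ (PySem.Str.split? content "\n").getD []) []
  let define_strs_list := series_filter_list.filter (fun x => !(PySem.Str.isIn "loc" x))
  let filter_strs_list := series_filter_list.filter (fun x => PySem.Str.isIn "loc" x)
  (define_strs_list ++ filter_strs_list, "between")

-- ===== PORT B =====
-- the boolean sort key 'loc' in x is ported as 0/1 : Nat (Python bools compare as ints).
def parallel_filter_handle_alt (filter_before_exec : List String) : List String × String :=
  let series_filter_list :=
    filter_before_exec.flatMap (fun content => (PySem.Str.split? content "\n").getD [])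
  (PySem.List.sorted series_filter_list
      (fun x => if PySem.Str.isIn "loc" x then (1 : Nat) else 0), "between")

-- ===== PRECONDITION & SPEC =====
def Spec_parallel_filter_handle (filter_before_exec : List String) (out : List String × String) : Prop := out = parallel_filter_handle_alt filter_before_exec
instance (filter_before_exec : List String) (out : List String × String) : Decidable (Spec_parallel_filter_handle filter_before_exec out) := by unfold Spec_parallel_filter_handle; infer_instance

-- ===== CLAIM (what is proved, stated in full; the proofs are below) =====
def Claim_equal_parallel_filter_handle : Prop := ∀ (filter_before_exec : List String), Dom_parallel_filter_handle filter_before_exec → Spec_parallel_filter_handle filter_before_exec (parallel_filter_handle filter_before_exec)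

-- ===== LEMMAS AND PROOFS =====

-- insertBy passes over a prefix whose elements never trigger `before`.
lemma insertBy_append_of_not_before {α : Type} (before : α → α → Bool) (x : α)
    (A B : List α) (hA : ∀ a ∈ A, before x a = false) :
    PySem.List.insertBy before x (A ++ B) = A ++ PySem.List.insertBy before x B := by
  induction A with
  | nil => simp
  | cons a rest ih =>
      have ha : before x a = false := hA a (by simp)
      simp only [List.cons_append, PySem.List.insertBy, ha]
      simp [ih (fun a' h => hA a' (by simp [h]))]

-- stable insertion sort on a 0/1 key is a stable partition: loop invariant.
lemma foldl_insertBy_partition (p : String → Bool) (xs : List String) :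
    ∀ (A B : List String), (∀ a ∈ A, p a = false) → (∀ b ∈ B, p b = true) →
    xs.foldl (fun acc x =>
        PySem.List.insertBy
          (fun a b => decide ((if p a then (1 : Nat) else 0) < (if p b then (1 : Nat) else 0))) x acc)
      (A ++ B)
    = (A ++ xs.filter (fun x => !p x)) ++ (B ++ xs.filter p) := by
  induction xs with
  | nil => intro A B _ _; simp
  | cons x rest ih =>
      intro A B hA hB
      by_cases hx : p x = true
      · have hins : PySem.List.insertBy
            (fun a b => decide ((if p a then (1 : Nat) else 0) < (if p b then (1 : Nat) else 0))) x (A ++ B)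
            = (A ++ B) ++ [x] := by
          apply PySem.List.insertBy_of_forall_not_before
          intro y _; simp [hx]; split <;> omega
        simp only [List.foldl_cons, hins, List.append_assoc]
        have := ih A (B ++ [x]) hA (by intro b hb; rcases List.mem_append.mp hb with h | h
                                       · exact hB b h
                                       · simp at h; simpa [h])
        rw [← List.append_assoc] at this ⊢
        rw [this]
        simp [hx]
      · have hx' : p x = false := by simpa using hx
        have hins : PySem.List.insertBy
            (fun a b => decide ((if p a then (1 : Nat) else 0) < (if p b then (1 : Nat) else 0))) x (A ++ B)
            = (A ++ [x]) ++ B := by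
          rw [insertBy_append_of_not_before _ _ A B
              (fun a ha => by simp [hx', hA a ha])]
          cases B with
          | nil => simp [PySem.List.insertBy]
          | cons b bs =>
              have hb : p b = true := hB b (by simp)
              simp [PySem.List.insertBy, hx', hb]
        simp only [List.foldl_cons, hins]
        have := ih (A ++ [x]) B (by intro a ha; rcases List.mem_append.mp ha with h | h
                                    · exact hA a h
                                    · simp at h; simpa [h]) hB
        rw [this]
        simp [hx']

lemma sorted_key01_eq_partition (p : String → Bool) (xs : List String) :
    PySem.List.sorted xs (fun x => if p x then (1 : Nat) else 0)
      = xs.filter (fun x => !p x) ++ xs.filter p := by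
  rw [PySem.List.sorted_eq_foldl_insertBy]
  have := foldl_insertBy_partition p xs [] [] (by simp) (by simp)
  simpa using this

-- ===== VERDICT (by name: the statement is the Claim_ definition above) =====
theorem parallel_filter_handle_spec : Claim_equal_parallel_filter_handle := by
  intro fbe _
  unfold Spec_parallel_filter_handle parallel_filter_handle parallel_filter_handle_alt
  rw [PySem.List.foldl_append_eq_flatMap]
  simp only [List.nil_append]
  rw [sorted_key01_eq_partition (fun x => PySem.Str.isIn "loc" x)]
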